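-- pv_equiv track=rewrite | github.com/saund/wordle-assistant | src/wordleAssistant.py | completePartialCombo
-- ===== SOURCE A (Python) =====
-- def completePartialCombo(partial_combo):
--     if len(partial_combo) == 5:
--         return [partial_combo]
--     ret_list = []
--     for char_response in ('r', 'l', 'y'):
--         new_partial_combo = partial_combo[:]
--         new_partial_combo.append(char_response)
--         npc_ret = completePartialCombo(new_partial_combo)
--         ret_list.extend(npc_ret)
--     return ret_list
-- ===== SOURCE B (Python) =====
-- def completePartialCombo(partial_combo):
--     # breadth-first iterative expansion instead of recursive tree descent
--     combos = [list(partial_combo)]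
--     for _ in range(5 - len(partial_combo)):
--         combos = [t + [c] for t in combos for c in 'rly']
--     return combos
-- ===== Notes on version B (the rewrite author's own statement) =====
-- stated objective: idiomatic
-- what changed: Replaces the per-character recursive tree descent with an iterative breadth-first product expansion: one loop that extends every partial combo by each of 'r','l','y' until length 5.
import Mathlib
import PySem

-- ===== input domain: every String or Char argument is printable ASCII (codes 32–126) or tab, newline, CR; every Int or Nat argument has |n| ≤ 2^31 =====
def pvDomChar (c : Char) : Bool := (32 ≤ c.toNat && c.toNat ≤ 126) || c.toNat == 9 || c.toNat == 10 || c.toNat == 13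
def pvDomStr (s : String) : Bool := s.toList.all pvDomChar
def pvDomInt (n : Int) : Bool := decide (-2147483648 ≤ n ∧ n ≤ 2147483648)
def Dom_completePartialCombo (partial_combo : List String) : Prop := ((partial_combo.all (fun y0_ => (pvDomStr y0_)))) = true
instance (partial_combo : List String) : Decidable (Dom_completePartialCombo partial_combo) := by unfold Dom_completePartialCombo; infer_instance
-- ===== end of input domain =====

-- B replaces A's recursive tree descent by one iterative breadth-first product-expansion loop (objective: idiomatic; same result, same order).

-- ===== PORT A =====
-- Faithful transliteration of A; the loop over the literal 3-tuple is unrolled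
-- (same calls, same order, extend = ++). On lists longer than 5 Python A recurses
-- forever (RecursionError); that branch is outside Pre_ and returns [] here only
-- to make the definition total.
def completePartialCombo (partial_combo : List String) : List (List String) :=
  if partial_combo.length = 5 then [partial_combo]
  else if 5 < partial_combo.length then []  -- A diverges here; excluded by Pre_
  else
    (([] ++ completePartialCombo (partial_combo ++ ["r"]))
        ++ completePartialCombo (partial_combo ++ ["l"]))
        ++ completePartialCombo (partial_combo ++ ["y"])
termination_by 5 - partial_combo.length
decreasing_by all_goals (simp [List.length_append]; omega)

-- ===== PORT B =====
-- one expansion round: [t + [c] for t in combos for c in 'rly']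
def pvAltStep (combos : List (List String)) : List (List String) :=
  combos.flatMap (fun t => ["r", "l", "y"].map (fun c => t ++ [c]))

-- range(5 - len(pc)) is empty when the Python value is negative, exactly like Nat subtraction.
def completePartialCombo_alt (partial_combo : List String) : List (List String) :=
  (List.range (5 - partial_combo.length)).foldl (fun combos _ => pvAltStep combos) [partial_combo]

-- ===== PRECONDITION & SPEC =====
-- Pre_ excludes lists longer than 5, on which Python A recurses forever (RecursionError).
def Pre_completePartialCombo (partial_combo : List String) : Prop := partial_combo.length ≤ 5
instance (partial_combo : List String) : Decidable (Pre_completePartialCombo partial_combo) := by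
  unfold Pre_completePartialCombo; infer_instance
def pvWitness_completePartialCombo : List String := ["r", "l"]

def Spec_completePartialCombo (partial_combo : List String) (out : List (List String)) : Prop := out = completePartialCombo_alt partial_combo
instance (partial_combo : List String) (out : List (List String)) : Decidable (Spec_completePartialCombo partial_combo out) := by unfold Spec_completePartialCombo; infer_instance

-- ===== CLAIM (what is proved, stated in full; the proofs are below) =====
def Claim_equal_completePartialCombo : Prop := ∀ (partial_combo : List String), Dom_completePartialCombo partial_combo → Pre_completePartialCombo partial_combo → Spec_completePartialCombo partial_combo (completePartialCombo partial_combo)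

-- ===== LEMMAS AND PROOFS =====

-- the index-ignoring foldl is iteration
theorem foldl_step_iterate (l : List Nat) (xs : List (List String)) :
    l.foldl (fun combos _ => pvAltStep combos) xs = pvAltStep^[l.length] xs := by
  induction l generalizing xs with
  | nil => rfl
  | cons a t ih => simp [List.foldl_cons, ih, Function.iterate_succ_apply]

theorem pvAltStep_append (xs ys : List (List String)) :
    pvAltStep (xs ++ ys) = pvAltStep xs ++ pvAltStep ys := by
  simp [pvAltStep]

theorem iterate_step_append (n : Nat) (xs ys : List (List String)) :
    pvAltStep^[n] (xs ++ ys) = pvAltStep^[n] xs ++ pvAltStep^[n] ys := by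
  induction n generalizing xs ys with
  | zero => rfl
  | succ k ih => simp [Function.iterate_succ_apply, pvAltStep_append, ih]

theorem completePartialCombo_iterate (k : Nat) :
    ∀ pc : List String, pc.length + k = 5 →
      completePartialCombo pc = pvAltStep^[k] [pc] := by
  induction k with
  | zero =>
    intro pc h
    rw [completePartialCombo]
    simp [show pc.length = 5 by omega]
  | succ k ih =>
    intro pc h
    rw [completePartialCombo]
    have h5 : ¬ pc.length = 5 := by omega
    have h5' : ¬ 5 < pc.length := by omega
    simp only [h5, h5', if_false]
    have hl : ∀ c : String, (pc ++ [c]).length + k = 5 := by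
      intro c; simp [List.length_append]; omega
    rw [ih _ (hl "r"), ih _ (hl "l"), ih _ (hl "y")]
    have : pvAltStep [pc] = [pc ++ ["r"]] ++ [pc ++ ["l"]] ++ [pc ++ ["y"]] := by
      simp [pvAltStep]
    rw [Function.iterate_succ_apply, this, iterate_step_append, iterate_step_append]
    simp

-- ===== VERDICT (by name: the statement is the Claim_ definition above) =====
theorem completePartialCombo_spec : Claim_equal_completePartialCombo := by
  intro pc _ hpre
  unfold Spec_completePartialCombo completePartialCombo_alt
  rw [foldl_step_iterate, List.length_range]
  exact completePartialCombo_iterate (5 - pc.length) pc (by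
    unfold Pre_completePartialCombo at hpre; omega)
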